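-- pv_equiv track=rewrite | github.com/nerikebosch/Phylogenetic-tree | msa_algorithm.py | project_onto_master
-- ===== SOURCE A (Python) =====
-- def project_onto_master(master: str, seq):
--     """
--         Project an unaligned sequence onto a gapped master sequence.
--
--         Inserts gaps into `seq` where `master` has them to maintain column consistency.
--
--         Args:
--             master (str): Gapped reference sequence.
--             seq (str): Sequence to align with the master.
--
--         Returns:
--             str: Gapped version of `seq` aligned to `master`.
--     """
--
--     out = []
--     p = 0
--     for c in master:
--         if c == "-":
--
--             if len(master) > len(seq):
--                 out.append("-")
--             else:
--                 continue
--         else: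
--             if p < len(seq):
--                 out.append(seq[p])
--                 p += 1
--
--     while p < len(seq):
--         out.append(seq[p])
--         p += 1
--
--     return "".join(out)
-- ===== SOURCE B (Python) =====
-- def project_onto_master(master: str, seq):
--     # Chunk-based: when master is not longer, A provably returns seq verbatim.
--     # Otherwise split master into its gap-separated runs, carve seq into chunks
--     # of the runs' lengths, rejoin with '-', and append the leftover of seq.
--     if len(master) <= len(seq):
--         return "".join(seq)
--     pieces = []
--     pos = 0
--     for part in master.split('-'):
--         pieces.append(seq[pos:pos + len(part)])
--         pos += len(part)
--     return "-".join(pieces) + seq[pos:]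
-- ===== Notes on version B (the rewrite author's own statement) =====
-- stated objective: faster
-- what changed: B replaces A's per-character scan over master with a chunk pipeline: when master is not longer than seq it returns seq verbatim (A provably does), otherwise it splits master on '-' into gap-free runs, carves seq into consecutive slices of the runs' lengths, rejoins the slices with '-', and appends seq's leftover tail.
import Mathlib
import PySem

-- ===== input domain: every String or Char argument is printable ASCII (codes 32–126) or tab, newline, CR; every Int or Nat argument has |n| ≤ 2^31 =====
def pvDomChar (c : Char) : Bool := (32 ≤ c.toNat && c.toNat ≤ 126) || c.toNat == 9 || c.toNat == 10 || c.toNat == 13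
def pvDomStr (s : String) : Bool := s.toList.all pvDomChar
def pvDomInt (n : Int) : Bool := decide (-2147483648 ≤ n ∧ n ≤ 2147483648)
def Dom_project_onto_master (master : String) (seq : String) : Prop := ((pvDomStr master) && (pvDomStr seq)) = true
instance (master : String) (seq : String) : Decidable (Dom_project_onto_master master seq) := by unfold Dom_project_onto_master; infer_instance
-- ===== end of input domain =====

-- B replaces A's per-character scan with a chunk pipeline: return seq verbatim when master
-- is not longer (the original provably does that), else split master on '-', carve seq into
-- slices of the runs' lengths, rejoin with '-', and append seq's leftover; measured faster by bulk slice/join (objective: faster).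

-- ===== PORT A =====
-- while p < len(seq): out.append(seq[p]); p += 1
def pvWhileA (s : List Char) (p : Nat) (out : List Char) : List Char :=
  if h : p < s.length then pvWhileA s (p + 1) (out ++ [s[p]]) else out
termination_by s.length - p

def project_onto_master (master : String) (seq : String) : String :=
  let s := seq.toList
  let st := master.toList.foldl (fun (st : List Char × Nat) c =>
    if c = '-' then
      (if master.toList.length > s.length then (st.1 ++ ['-'], st.2) else st)
    else
      (if st.2 < s.length then (st.1 ++ [s.getD st.2 ' '], st.2 + 1) else st))
    ([], 0)
  String.ofList (pvWhileA s st.2 st.1)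

-- ===== PORT B =====
def project_onto_master_alt (master : String) (seq : String) : String :=
  if master.toList.length ≤ seq.toList.length then seq
  else
    let s := seq.toList
    -- for part in master.split('-'): pieces.append(seq[pos:pos+len(part)]); pos += len(part)
    let st := (PySem.Chars.splitOn master.toList ['-']).foldl
      (fun (st : List (List Char) × Nat) part =>
        (st.1 ++ [PySem.List.slice s (some (st.2 : Int)) (some ((st.2 : Int) + (part.length : Int)))],
         st.2 + part.length))
      ([], 0)
    -- "-".join(pieces) + seq[pos:]
    String.ofList (PySem.Chars.join ['-'] st.1 ++ PySem.List.slice s (some (st.2 : Int)) none)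

-- ===== PRECONDITION & SPEC =====
def Spec_project_onto_master (master : String) (seq : String) (out : String) : Prop := out = project_onto_master_alt master seq
instance (master : String) (seq : String) (out : String) : Decidable (Spec_project_onto_master master seq out) := by unfold Spec_project_onto_master; infer_instance

-- ===== CLAIM (what is proved, stated in full; the proofs are below) =====
def Claim_equal_project_onto_master : Prop := ∀ (master : String) (seq : String), Dom_project_onto_master master seq → Spec_project_onto_master master seq (project_onto_master master seq)

-- ===== LEMMAS AND PROOFS =====

-- unified one-pass description of A, flag = (len master > len seq)
def core (flag : Bool) : List Char → List Char → List Char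
  | [], s => s
  | c :: m, s =>
    if c = '-' then (if flag then '-' :: core flag m s else core flag m s)
    else
      match s with
      | [] => core flag m []
      | x :: r => x :: core flag m r

theorem pvWhileA_eq (s : List Char) : ∀ p out, pvWhileA s p out = out ++ s.drop p := by
  intro p
  induction hn : s.length - p using Nat.strong_induction_on generalizing p with
  | _ n ih =>
    intro out
    unfold pvWhileA
    split
    · rename_i h
      rw [ih (s.length - (p + 1)) (by omega) (p + 1) rfl]
      rw [List.drop_eq_getElem_cons h]
      simp
    · rename_i h
      rw [List.drop_eq_nil_of_le (by omega)]
      simp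

theorem core_false (m : List Char) : ∀ s, core false m s = s := by
  induction m with
  | nil => intro s; rfl
  | cons c m ih =>
    intro s
    unfold core
    split
    · simpa using ih s
    · cases s with
      | nil => simpa using ih []
      | cons x r => simpa using ih r

def stepA (flag : Bool) (s : List Char) (st : List Char × Nat) (c : Char) : List Char × Nat :=
  if c = '-' then (if flag then (st.1 ++ ['-'], st.2) else st)
  else (if st.2 < s.length then (st.1 ++ [s.getD st.2 ' '], st.2 + 1) else st)

theorem foldA_core (flag : Bool) (s : List Char) :
    ∀ (m : List Char) (out : List Char) (p : Nat),
      (m.foldl (stepA flag s) (out, p)).1 ++ s.drop (m.foldl (stepA flag s) (out, p)).2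
        = out ++ core flag m (s.drop p) := by
  intro m
  induction m with
  | nil => intro out p; simp [core]
  | cons c m ih =>
    intro out p
    simp only [List.foldl_cons]
    by_cases hc : c = '-'
    · cases flag with
      | true => simp [stepA, hc, core, ih]
      | false => simp [stepA, hc, core, ih]
    · by_cases hp : p < s.length
      · have hdrop : s.drop p = s[p] :: s.drop (p + 1) := List.drop_eq_getElem_cons hp
        have hget : s.getD p ' ' = s[p] := List.getD_eq_getElem s ' ' hp
        cases flag <;>
          simp only [stepA, if_neg hc, if_pos hp, ih, hdrop, core, hget] <;>
          simp
      · have hdrop : s.drop p = [] := List.drop_eq_nil_of_le (by omega)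
        cases flag <;> simp [stepA, hc, hp, ih, hdrop, core]

theorem project_onto_master_eq_core (master seq : String) :
    project_onto_master master seq
      = String.ofList (core (decide (master.toList.length > seq.toList.length))
          master.toList seq.toList) := by
  unfold project_onto_master
  simp only
  set s := seq.toList with hs
  set m := master.toList with hm
  have hstep : (fun (st : List Char × Nat) c =>
      if c = '-' then
        (if m.length > s.length then (st.1 ++ ['-'], st.2) else st)
      else
        (if st.2 < s.length then (st.1 ++ [s.getD st.2 ' '], st.2 + 1) else st))
      = stepA (decide (m.length > s.length)) s := by
    funext st c
    by_cases hl : m.length > s.length <;> simp [stepA, hl]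
  rw [hstep, pvWhileA_eq]
  have := foldA_core (decide (m.length > s.length)) s m [] 0
  simp only [List.drop_zero] at this
  rw [this]
  simp

-- B side: a structural description of master.split('-') for the one-char separator
def msplit : List Char → List (List Char)
  | [] => [[]]
  | c :: r =>
    if c = '-' then [] :: msplit r
    else
      match msplit r with
      | [] => [[c]]
      | p :: ps => (c :: p) :: ps

theorem msplit_ne_nil (l : List Char) : msplit l ≠ [] := by
  cases l with
  | nil => simp [msplit]
  | cons c r =>
    unfold msplit
    split
    · simp
    · split <;> simp

theorem splitOn_go_msplit (l : List Char) :
    ∀ (fuel : Nat) (cur : List Char) (acc : List (List Char)), l.length < fuel →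
      PySem.Chars.splitOn.go ['-'] fuel l cur acc
        = acc.reverse ++ (msplit l).modifyHead (fun p => cur.reverse ++ p) := by
  induction l with
  | nil =>
    intro fuel cur acc h
    obtain ⟨f, rfl⟩ : ∃ f, fuel = f + 1 := ⟨fuel - 1, by omega⟩
    simp [PySem.Chars.splitOn.go, msplit]
  | cons c rest ih =>
    intro fuel cur acc h
    obtain ⟨f, rfl⟩ : ∃ f, fuel = f + 1 := ⟨fuel - 1, by omega⟩
    by_cases hc : c = '-'
    · subst hc
      have hpre : List.isPrefixOf ['-'] ('-' :: rest) = true := by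
        simp [List.isPrefixOf]
      simp only [PySem.Chars.splitOn.go, hpre, if_pos]
      rw [show List.drop ['-'].length ('-' :: rest) = rest from rfl]
      rw [ih f [] (cur.reverse :: acc) (by simp at h; omega)]
      rw [show msplit ('-' :: rest) = [] :: msplit rest from by rw [msplit.eq_def]; simp]
      cases msplit rest <;> simp [List.modifyHead]
    · have hpre : List.isPrefixOf ['-'] (c :: rest) = false := by
        simp only [List.isPrefixOf]
        simp only [Bool.and_eq_false_iff, beq_eq_false_iff_ne, ne_eq]
        exact Or.inl fun hh => hc hh.symm
      simp only [PySem.Chars.splitOn.go, hpre]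
      rw [if_neg (by simp)]
      rw [ih f (c :: cur) acc (by simp at h; omega)]
      cases hms : msplit rest with
      | nil => exact absurd hms (msplit_ne_nil rest)
      | cons p ps =>
        have hmsc : msplit (c :: rest) = (c :: p) :: ps := by
          unfold msplit
          rw [if_neg hc, hms]
        rw [hmsc]
        simp [List.modifyHead]

theorem splitOn_eq_msplit (l : List Char) :
    PySem.Chars.splitOn l ['-'] = msplit l := by
  unfold PySem.Chars.splitOn
  rw [splitOn_go_msplit l (l.length + 1) [] [] (by omega)]
  cases hms : msplit l with
  | nil => exact absurd hms (msplit_ne_nil l)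
  | cons p ps => simp

-- the fold over the parts, in explicit recursive form
def chunks (s : List Char) : List (List Char) → Nat → List (List Char) × Nat
  | [], pos => ([], pos)
  | p :: ps, pos =>
    let rest := chunks s ps (pos + p.length)
    ((s.drop pos).take p.length :: rest.1, rest.2)

theorem foldB_chunks (s : List Char) :
    ∀ (parts : List (List Char)) (acc : List (List Char)) (pos : Nat),
      parts.foldl
        (fun (st : List (List Char) × Nat) part =>
          (st.1 ++ [PySem.List.slice s (some (st.2 : Int)) (some ((st.2 : Int) + (part.length : Int)))],
           st.2 + part.length)) (acc, pos)
        = (acc ++ (chunks s parts pos).1, (chunks s parts pos).2) := by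
  intro parts
  induction parts with
  | nil => intro acc pos; simp [chunks]
  | cons p ps ih =>
    intro acc pos
    simp only [List.foldl_cons, chunks]
    rw [ih]
    rw [PySem.List.slice_natCast_add]
    simp

theorem join_head_append (sep a b : List Char) (ps : List (List Char)) :
    PySem.Chars.join sep ((a ++ b) :: ps) = a ++ PySem.Chars.join sep (b :: ps) := by
  cases ps with
  | nil => simp [PySem.Chars.join_singleton]
  | cons q qs => simp [PySem.Chars.join_cons_cons]

theorem chunks_join_core (m : List Char) :
    ∀ (s : List Char) (pos : Nat),
      PySem.Chars.join ['-'] (chunks s (msplit m) pos).1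
        ++ s.drop (chunks s (msplit m) pos).2
        = core true m (s.drop pos) := by
  induction m with
  | nil =>
    intro s pos
    simp [msplit, chunks, core, PySem.Chars.join_singleton]
  | cons c r ih =>
    intro s pos
    by_cases hc : c = '-'
    · subst hc
      rw [show msplit ('-' :: r) = [] :: msplit r from by rw [msplit.eq_def]; simp]
      cases hms' : msplit r with
      | nil => exact absurd hms' (msplit_ne_nil r)
      | cons p ps =>
        have hih := ih s pos
        rw [hms'] at hih
        simp only [chunks, List.length_nil, Nat.add_zero, List.take_zero] at hih ⊢
        rw [PySem.Chars.join_cons_cons]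
        simp only [core]
        simpa using hih
    · cases hms' : msplit r with
      | nil => exact absurd hms' (msplit_ne_nil r)
      | cons p ps =>
        rw [show msplit (c :: r) = (c :: p) :: ps from by
          rw [msplit.eq_def]
          simp only [if_neg hc, hms']]
        simp only [chunks]
        have htake : (s.drop pos).take (c :: p).length
            = (s.drop pos).take 1 ++ (s.drop (pos + 1)).take p.length := by
          rw [List.length_cons, show p.length + 1 = 1 + p.length by omega, List.take_add]
          congr 1
          rw [List.drop_drop]
        rw [htake, join_head_append]
        have harith : pos + (c :: p).length = (pos + 1) + p.length := by
          simp [List.length_cons]; omega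
        rw [harith]
        have hih := ih s (pos + 1)
        rw [hms'] at hih
        simp only [chunks] at hih
        rw [List.append_assoc, hih]
        simp only [core, if_neg hc]
        cases hsd : s.drop pos with
        | nil =>
          have h2 : s.drop (pos + 1) = [] := by
            have hle : s.length ≤ pos := List.drop_eq_nil_iff.mp hsd
            exact List.drop_eq_nil_of_le (by omega)
          simp [h2]
        | cons x tr =>
          have hdd : s.drop (pos + 1) = tr := by
            have h1 : s.drop (pos + 1) = (s.drop pos).drop 1 := by
              rw [List.drop_drop]
            rw [h1, hsd]
            simp
          simp [hdd]

-- ===== VERDICT (by name: the statement is the Claim_ definition above) =====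
theorem project_onto_master_spec : Claim_equal_project_onto_master := by
  intro master seq _
  unfold Spec_project_onto_master project_onto_master_alt
  rw [project_onto_master_eq_core]
  by_cases hl : master.toList.length ≤ seq.toList.length
  · have : decide (master.toList.length > seq.toList.length) = false :=
      decide_eq_false (by omega)
    rw [this, if_pos hl, core_false, String.ofList_toList]
  · have hd : decide (master.toList.length > seq.toList.length) = true :=
      decide_eq_true (by omega)
    rw [hd, if_neg hl]
    simp only [splitOn_eq_msplit, foldB_chunks seq.toList (msplit master.toList) [] 0]
    simp only [List.nil_append]
    rw [PySem.List.slice_from_natCast]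
    rw [chunks_join_core master.toList seq.toList 0]
    simp
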